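-- pv_equiv track=rewrite | github.com/SonyCSLParis/interactive-spectrogram-inpainting | flask_server.py | make_time_indexes
-- ===== SOURCE A (Python) =====
-- from typing import Union, Tuple, Mapping, Optional, Dict, List
--
-- def make_time_indexes(start_index: int, codemap_duration: int,
--                       transformer_duration: int) -> List[int]:
--     time_indexes_full = [0]  # attack
--     num_steps_to_repeat = transformer_duration - 2
--     steps_repetitions = (codemap_duration - 2) // num_steps_to_repeat
--     for i in range(num_steps_to_repeat - 1):
--         time_indexes_full += [i+1] * steps_repetitions
--     time_indexes_full += [num_steps_to_repeat] * (
--         (codemap_duration - 2) - (len(time_indexes_full)-1))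
--     time_indexes_full += [transformer_duration-1]
--
--     return time_indexes_full[start_index:
--                              start_index+transformer_duration]
-- ===== SOURCE B (Python) =====
-- def make_time_indexes(start_index, codemap_duration, transformer_duration):
--     # Run-length encoding of the full time-index list, sliced without materialising it.
--     nstr = transformer_duration - 2
--     reps = (codemap_duration - 2) // nstr
--     runs = [(0, 1)]
--     runs += [(step, reps) for step in range(1, nstr)]
--     covered = sum(c for _, c in runs if c > 0)
--     runs.append((nstr, codemap_duration - 1 - covered))
--     runs.append((transformer_duration - 1, 1))
--     total = sum(c for _, c in runs if c > 0)
--     lo, hi, _ = slice(start_index, start_index + transformer_duration).indices(total)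
--     out = []
--     pos = 0
--     for v, c in runs:
--         if c > 0:
--             out += [v] * (min(pos + c, hi) - max(pos, lo))
--             pos += c
--     return out
-- ===== Notes on version B (the rewrite author's own statement) =====
-- stated objective: alternative
-- what changed: Instead of materialising the full length-codemap_duration index list and slicing it, B builds a run-length encoding (value, count) of that list, normalises the slice bounds with the standard slice.indices, and emits only the overlap of each run with the window; Pre_ excludes only transformer_duration = 2, where A raises ZeroDivisionError (B raises there too).
import Mathlib
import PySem

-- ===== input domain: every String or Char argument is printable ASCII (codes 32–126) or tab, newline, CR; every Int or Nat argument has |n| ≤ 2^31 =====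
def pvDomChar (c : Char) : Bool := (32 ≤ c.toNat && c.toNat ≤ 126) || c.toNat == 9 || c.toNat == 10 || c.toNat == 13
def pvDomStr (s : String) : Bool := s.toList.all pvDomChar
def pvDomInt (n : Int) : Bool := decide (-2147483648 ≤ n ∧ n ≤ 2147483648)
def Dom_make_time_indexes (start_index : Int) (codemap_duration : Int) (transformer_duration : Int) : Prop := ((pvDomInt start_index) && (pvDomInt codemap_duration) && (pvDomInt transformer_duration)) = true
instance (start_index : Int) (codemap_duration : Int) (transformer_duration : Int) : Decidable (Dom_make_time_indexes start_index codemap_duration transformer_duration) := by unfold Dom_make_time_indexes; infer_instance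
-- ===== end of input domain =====

-- B replaces A's "build the full time-index list, then slice" by a run-length
-- encoding of that list whose runs are intersected with the slice window, so
-- the part of the list outside the window is never materialised.


-- ===== PORT A =====
def make_time_indexes (start_index : Int) (codemap_duration : Int) (transformer_duration : Int) : List Int :=
  let time_indexes_full : List Int := [0]  -- attack
  let num_steps_to_repeat := transformer_duration - 2
  let steps_repetitions := PySem.Int.floordiv (codemap_duration - 2) num_steps_to_repeat
  let time_indexes_full := (PySem.List.pyRange 0 (num_steps_to_repeat - 1) 1).foldl
    (fun acc i => acc ++ List.replicate steps_repetitions.toNat (i + 1)) time_indexes_full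
  let time_indexes_full := time_indexes_full ++
    List.replicate ((codemap_duration - 2) - ((time_indexes_full.length : Int) - 1)).toNat num_steps_to_repeat
  let time_indexes_full := time_indexes_full ++ [transformer_duration - 1]
  PySem.List.slice time_indexes_full (some start_index) (some (start_index + transformer_duration))

-- ===== PORT B =====
-- Source B: run-length encoding (value, count) of the full list; slice.indices is
-- ported as PySem.List.clampIdx (Python's normalisation of step-1 slice bounds).
def make_time_indexes_alt (start_index : Int) (codemap_duration : Int) (transformer_duration : Int) : List Int :=
  let nstr := transformer_duration - 2
  let reps := PySem.Int.floordiv (codemap_duration - 2) nstr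
  let runs : List (Int × Int) := [(0, 1)]
  let runs := runs ++ (PySem.List.pyRange 1 nstr 1).map (fun step => (step, reps))
  let covered := (runs.filter (fun p => decide (0 < p.2))).foldl (fun a p => a + p.2) 0
  let runs := runs ++ [(nstr, codemap_duration - 1 - covered)]
  let runs := runs ++ [(transformer_duration - 1, 1)]
  let total := (runs.filter (fun p => decide (0 < p.2))).foldl (fun a p => a + p.2) 0
  let lo : Int := (PySem.List.clampIdx total.toNat start_index : Int)
  let hi : Int := (PySem.List.clampIdx total.toNat (start_index + transformer_duration) : Int)
  (runs.foldl (fun (st : List Int × Int) (p : Int × Int) =>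
      if 0 < p.2 then
        (st.1 ++ List.replicate (min (st.2 + p.2) hi - max st.2 lo).toNat p.1, st.2 + p.2)
      else st) (([] : List Int), (0 : Int))).1

-- ===== PRECONDITION & SPEC =====
-- Pre_ excludes exactly transformer_duration = 2, where Python A raises
-- ZeroDivisionError (num_steps_to_repeat = 0); Python B raises there too.
def Pre_make_time_indexes (start_index : Int) (codemap_duration : Int) (transformer_duration : Int) : Prop :=
  transformer_duration ≠ 2
instance (start_index : Int) (codemap_duration : Int) (transformer_duration : Int) : Decidable (Pre_make_time_indexes start_index codemap_duration transformer_duration) := by unfold Pre_make_time_indexes; infer_instance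
def pvWitness_make_time_indexes : Int × Int × Int := (1, 12, 6)

def Spec_make_time_indexes (start_index : Int) (codemap_duration : Int) (transformer_duration : Int) (out : List Int) : Prop := out = make_time_indexes_alt start_index codemap_duration transformer_duration
instance (start_index : Int) (codemap_duration : Int) (transformer_duration : Int) (out : List Int) : Decidable (Spec_make_time_indexes start_index codemap_duration transformer_duration out) := by unfold Spec_make_time_indexes; infer_instance

-- ===== CLAIM (what is proved, stated in full; the proofs are below) =====
def Claim_equal_make_time_indexes : Prop := ∀ (start_index : Int) (codemap_duration : Int) (transformer_duration : Int), Dom_make_time_indexes start_index codemap_duration transformer_duration → Pre_make_time_indexes start_index codemap_duration transformer_duration → Spec_make_time_indexes start_index codemap_duration transformer_duration (make_time_indexes start_index codemap_duration transformer_duration)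

-- ===== LEMMAS AND PROOFS =====

-- expansion of a run-length encoding
def pvExpand (runs : List (Int × Int)) : List Int :=
  runs.flatMap (fun p => List.replicate p.2.toNat p.1)

-- B's emission loop produces exactly the [lo, hi) window of the expansion.
lemma pv_loop (lo hi : Int)
    (runs : List (Int × Int)) (acc : List Int) (pos : Int) (hpos : 0 ≤ pos) :
    (runs.foldl (fun (st : List Int × Int) (p : Int × Int) =>
        if 0 < p.2 then
          (st.1 ++ List.replicate (min (st.2 + p.2) hi - max st.2 lo).toNat p.1, st.2 + p.2)
        else st) (acc, pos)).1
      = acc ++ ((pvExpand runs).drop (lo - pos).toNat).take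
          ((hi - pos).toNat - (lo - pos).toNat) := by
  induction runs generalizing acc pos with
  | nil => simp [pvExpand]
  | cons hd tl ih =>
    by_cases hc : 0 < hd.2
    · rw [List.foldl_cons, if_pos hc, ih _ _ (by omega), List.append_assoc]
      congr 1
      simp only [pvExpand, List.flatMap_cons]
      rw [List.drop_append, List.take_append, List.drop_replicate, List.take_replicate,
        List.length_replicate]
      simp only [List.length_replicate]
      have e1 : (min (pos + hd.2) hi - max pos lo).toNat
          = min ((hi - pos).toNat - (lo - pos).toNat) (hd.2.toNat - (lo - pos).toNat) := by
        omega
      have e2 : (lo - pos).toNat - hd.2.toNat = (lo - (pos + hd.2)).toNat := by omega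
      have e3 : (hi - pos).toNat - (lo - pos).toNat - (hd.2.toNat - (lo - pos).toNat)
          = (hi - (pos + hd.2)).toNat - (lo - (pos + hd.2)).toNat := by omega
      rw [e1, e2, e3]
    · have h0 : hd.2.toNat = 0 := by omega
      rw [List.foldl_cons, if_neg hc]
      simp only [pvExpand, List.flatMap_cons, h0, List.replicate_zero, List.nil_append]
      exact ih acc pos hpos

-- range(1, m) is range(0, m-1) shifted by one
lemma pv_range_shift (m : Int) :
    PySem.List.pyRange 1 m 1 = (PySem.List.pyRange 0 (m - 1) 1).map (fun i => i + 1) := by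
  rw [PySem.List.pyRange_one, PySem.List.pyRange_one, List.map_map]
  have h : (m - 1 - 0).toNat = (m - 1).toNat := by norm_num
  rw [h]
  apply List.map_congr_left
  intro k _
  simp only [Function.comp_apply]
  omega

-- sum of the positive counts of a constant-count run list
lemma pv_sum_blocks (reps : Int) (l : List Int) (s : Int) :
    (((l.map (fun step => (step, reps))).filter (fun p => decide (0 < p.2))).foldl
        (fun a p => a + p.2) s)
      = s + (l.length * reps.toNat : Nat) := by
  induction l generalizing s with
  | nil => simp
  | cons x xs ih =>
    by_cases h : 0 < reps
    · have hr : ((reps.toNat : Nat) : Int) = reps := Int.toNat_of_nonneg h.le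
      simp only [List.map_cons, List.filter_cons]
      rw [if_pos (by simpa using h), List.foldl_cons, ih]
      push_cast [hr, List.length_cons]
      ring
    · have h0 : reps.toNat = 0 := by omega
      simp only [List.map_cons, List.filter_cons]
      rw [if_neg (by simpa using h), ih]
      simp [h0]

-- length of a constant-count expansion
lemma pv_len_flat (n : Nat) (f : Int → Int) (l : List Int) :
    (l.flatMap (fun i => List.replicate n (f i))).length = l.length * n := by
  induction l with
  | nil => simp
  | cons x xs ih => simp [ih]; ring

lemma pv_single_sum (v c s : Int) :
    (([(v, c)].filter (fun p => decide (0 < p.2))).foldl (fun a p => a + p.2) s)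
      = s + (c.toNat : Int) := by
  by_cases h : 0 < c
  · simp [h, Int.toNat_of_nonneg h.le]
  · have h0 : c.toNat = 0 := by omega
    simp [h, h0]

lemma pv_covered (reps : Int) (l : List Int) :
    ((([((0:Int), (1:Int))] ++ l.map (fun step => (step, reps))).filter
        (fun p => decide (0 < p.2))).foldl (fun a p => a + p.2) 0)
      = 1 + ((l.length * reps.toNat : Nat) : Int) := by
  rw [List.filter_append, List.foldl_append]
  have h1 : (([((0:Int), (1:Int))].filter (fun p => decide (0 < p.2))).foldl
      (fun a p => a + p.2) 0) = (1 : Int) := by decide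
  rw [h1, pv_sum_blocks]

lemma pv_expand_runs (nstr reps pad td1 : Int) (l : List Int) :
    pvExpand ((([((0:Int), (1:Int))] ++ l.map (fun step => (step, reps)))
        ++ [(nstr, pad)]) ++ [(td1, 1)])
      = [0] ++ l.flatMap (fun step => List.replicate reps.toNat step)
          ++ List.replicate pad.toNat nstr ++ [td1] := by
  simp only [pvExpand, List.flatMap_append, List.flatMap_map, List.flatMap_cons,
    List.flatMap_nil, List.append_nil, List.append_assoc]
  norm_num [Function.comp_def]

lemma pv_total (reps nstr pad1 td1 : Int) (l : List Int) :
    (List.foldl (fun a p => a + p.2) 0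
      (List.filter (fun p => decide (0 < p.2))
        ((([((0:Int), (1:Int))] ++ l.map (fun step => (step, reps)))
          ++ [(nstr, pad1)]) ++ [(td1, 1)])))
      = 1 + ((l.length * reps.toNat : Nat) : Int) + pad1.toNat + 1 := by
  rw [List.filter_append, List.filter_append, List.foldl_append, List.foldl_append,
    pv_covered, pv_single_sum, pv_single_sum]
  norm_num

lemma pv_main (si cd td : Int) :
    make_time_indexes si cd td = make_time_indexes_alt si cd td := by
  simp only [make_time_indexes, make_time_indexes_alt]
  rw [PySem.List.foldl_append_eq_flatMap, pv_range_shift]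
  rw [pv_loop _ _ _ _ _ le_rfl]
  rw [pv_expand_runs, List.flatMap_map]
  rw [pv_covered, pv_total]
  simp only [List.nil_append, sub_zero, Int.toNat_natCast, List.length_map,
    PySem.List.length_pyRange_one, List.length_append, List.length_cons, List.length_nil,
    pv_len_flat, List.length_replicate, PySem.List.slice]
  generalize hX : ((td - 2 - 1).toNat * (PySem.Int.floordiv (cd - 2) (td - 2)).toNat) = X
  have hpad : cd - 2 - ((((0 + 1 + X : Nat) : Int)) - 1) = cd - 1 - (1 + (X : Int)) := by
    push_cast; omega
  rw [hpad]
  generalize hP : (cd - 1 - (1 + (X : Int))).toNat = P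
  have htot : (1 + (X : Int) + (P : Int) + 1).toNat = 0 + 1 + X + P + (0 + 1) := by omega
  rw [htot]

-- ===== VERDICT (by name: the statement is the Claim_ definition above) =====
theorem make_time_indexes_spec : Claim_equal_make_time_indexes := by
  intro si cd td _hDom _hPre
  unfold Spec_make_time_indexes
  exact pv_main si cd td
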